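-- pv_equiv track=rewrite | github.com/Lam-Richard/aoc2024 | 2/2.py | tryWithSingleTurningPoint
-- ===== SOURCE A (Python) =====
-- def oldVerifyLine(line):
--     if isDuplicatesExist(line):
--         return False
--
--     if line != sorted(line) and line != sorted(line)[::-1]:
--         return False
--
--     absDiff = [abs(line[i] - line[i - 1]) for i in range(1, len(line))]
--     return min(absDiff) >= 1 and max(absDiff) < 4
--
-- def isDuplicatesExist(line):
--     return countDuplicates(line) != 0
--
-- def countDuplicates(line):
--     return len(line) - len(set(line))
--
-- def tryWithSingleTurningPoint(line):
--     isPeak = lambda i : line[i - 1] < line[i] and line[i + 1] < line[i]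
--     isValley = lambda i : line[i - 1] > line[i] and line[i + 1] > line[i]
--     isTurningPoint = lambda i : isPeak(i) or isValley(i)
--
--     indices = list(filter(isTurningPoint, list(range(2, len(line) - 1))))
--     indices.append(0)
--     indices.append(-1)
--
--     status = False
--     for index in indices:
--         newLine = line[:]
--         newLine.pop(index)
--         status = status or oldVerifyLine(newLine)
--     return status
-- ===== SOURCE B (Python) =====
-- def tryWithSingleTurningPoint(line):
--     n = len(line)
--
--     def ok(xs):
--         # valid iff consecutive diffs all lie in [1,3] or all in [-3,-1]
--         diffs = [xs[k + 1] - xs[k] for k in range(len(xs) - 1)]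
--         return all(1 <= d <= 3 for d in diffs) or all(-3 <= d <= -1 for d in diffs)
--
--     cands = [i for i in range(2, n - 1)
--              if (line[i - 1] < line[i] > line[i + 1]) or (line[i - 1] > line[i] < line[i + 1])]
--     cands.append(0)
--     cands.append(n - 1)
--     return any(ok(line[:i] + line[i + 1:]) for i in cands)
-- ===== Notes on version B (the rewrite author's own statement) =====
-- stated objective: alternative
-- what changed: Each candidate removal is verified by one scan of consecutive differences (all in [1,3] or all in [-3,-1]) instead of A's duplicate count via set(), two sorts, a reversal and min/max over an abs-diff list.
-- outside the precondition, e.g. on tryWithSingleTurningPoint([]): A raises IndexError, B returns True; on tryWithSingleTurningPoint([1, 2]): A raises ValueError, B returns True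
import Mathlib
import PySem

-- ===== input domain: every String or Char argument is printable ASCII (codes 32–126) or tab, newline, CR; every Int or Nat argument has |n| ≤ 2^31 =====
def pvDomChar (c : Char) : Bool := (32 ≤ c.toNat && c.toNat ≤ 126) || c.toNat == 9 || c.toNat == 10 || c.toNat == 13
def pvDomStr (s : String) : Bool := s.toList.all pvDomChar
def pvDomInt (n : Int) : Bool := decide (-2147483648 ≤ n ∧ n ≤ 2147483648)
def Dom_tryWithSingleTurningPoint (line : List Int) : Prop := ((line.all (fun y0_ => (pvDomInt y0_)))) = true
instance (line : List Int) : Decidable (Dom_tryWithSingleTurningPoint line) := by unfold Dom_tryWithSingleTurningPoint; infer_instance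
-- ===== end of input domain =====

-- B replaces A's per-removal check (set() duplicate count, two sorts, a reversal, min/max of
-- an abs-diff list) by one scan of consecutive differences (all in [1,3] or all in [-3,-1]);
-- objective: alternative (measured as not faster).

-- ===== PORT A =====
def countDuplicatesA (line : List Int) : Int :=
  (line.length : Int) - ((PySem.Set.ofList line).length : Int)

def isDuplicatesExistA (line : List Int) : Bool :=
  countDuplicatesA line != 0

def oldVerifyLineA (line : List Int) : Bool :=
  if isDuplicatesExistA line then false
  else if line ≠ PySem.List.sorted line (fun x => x) false ∧
          line ≠ (PySem.List.sorted line (fun x => x) false).reverse then false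
  else
    let absDiff := (PySem.List.pyRange 1 (line.length : Int) 1).map
      (fun i => |PySem.List.pyGetD line i 0 - PySem.List.pyGetD line (i - 1) 0|)
    match PySem.List.min? absDiff (fun x => x), PySem.List.max? absDiff (fun x => x) with
    | some mn, some mx => decide (1 ≤ mn) && decide (mx < 4)
    | _, _ => false   -- min()/max() of an empty list: Python raises ValueError (outside Pre_)

def tryWithSingleTurningPoint (line : List Int) : Bool :=
  let isPeak := fun (i : Int) =>
    PySem.List.pyGetD line (i - 1) 0 < PySem.List.pyGetD line i 0 &&
    PySem.List.pyGetD line (i + 1) 0 < PySem.List.pyGetD line i 0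
  let isValley := fun (i : Int) =>
    PySem.List.pyGetD line (i - 1) 0 > PySem.List.pyGetD line i 0 &&
    PySem.List.pyGetD line (i + 1) 0 > PySem.List.pyGetD line i 0
  let isTurningPoint := fun (i : Int) => isPeak i || isValley i
  let indices := (PySem.List.pyRange 2 ((line.length : Int) - 1) 1).filter isTurningPoint
                   ++ [0, -1]
  indices.foldl (fun status index =>
    match PySem.List.pop? line index with
    | some (_, newLine) => status || oldVerifyLineA newLine
    | none => status)   -- pop on empty list: Python raises IndexError (outside Pre_)
    false

-- ===== PORT B =====
def okB (xs : List Int) : Bool :=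
  let diffs := (PySem.List.pyRange 0 ((xs.length : Int) - 1) 1).map
    (fun k => PySem.List.pyGetD xs (k + 1) 0 - PySem.List.pyGetD xs k 0)
  diffs.all (fun d => decide (1 ≤ d) && decide (d ≤ 3)) ||
  diffs.all (fun d => decide (-3 ≤ d) && decide (d ≤ -1))

def tryWithSingleTurningPoint_alt (line : List Int) : Bool :=
  let n : Int := line.length
  let cands := (PySem.List.pyRange 2 (n - 1) 1).filter (fun i =>
      (PySem.List.pyGetD line (i - 1) 0 < PySem.List.pyGetD line i 0 &&
       PySem.List.pyGetD line i 0 > PySem.List.pyGetD line (i + 1) 0) ||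
      (PySem.List.pyGetD line (i - 1) 0 > PySem.List.pyGetD line i 0 &&
       PySem.List.pyGetD line i 0 < PySem.List.pyGetD line (i + 1) 0))
    ++ [0, n - 1]
  cands.any (fun i =>
    okB (PySem.List.slice line none (some i) ++ PySem.List.slice line (some (i + 1)) none))

-- ===== PRECONDITION & SPEC =====
-- Pre_ excludes exactly the lists of length < 3, on which Python A raises
-- (ValueError from min([]) for lengths 1 and 2, IndexError from pop(0) on []).
def Pre_tryWithSingleTurningPoint (line : List Int) : Prop := 3 ≤ line.length
instance (line : List Int) : Decidable (Pre_tryWithSingleTurningPoint line) := by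
  unfold Pre_tryWithSingleTurningPoint; infer_instance

def pvWitness_tryWithSingleTurningPoint : List Int := [1, 2, 5, 4]

def Spec_tryWithSingleTurningPoint (line : List Int) (out : Bool) : Prop :=
  out = tryWithSingleTurningPoint_alt line
instance (line : List Int) (out : Bool) : Decidable (Spec_tryWithSingleTurningPoint line out) := by
  unfold Spec_tryWithSingleTurningPoint; infer_instance

-- ===== CLAIM (what is proved, stated in full; the proofs are below) =====
def Claim_equal_tryWithSingleTurningPoint : Prop :=
  ∀ (line : List Int), Dom_tryWithSingleTurningPoint line →
    Pre_tryWithSingleTurningPoint line →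
    Spec_tryWithSingleTurningPoint line (tryWithSingleTurningPoint line)

-- ===== LEMMAS AND PROOFS =====

-- the list of consecutive differences of xs (a common normal form for both ports)
def dList (xs : List Int) : List Int :=
  (List.range (xs.length - 1)).map (fun k => xs.getD (k + 1) 0 - xs.getD k 0)

theorem forall_dList (xs : List Int) (P : Int → Prop) :
    (∀ z ∈ dList xs, P z) ↔ ∀ (k : Nat) (h : k + 1 < xs.length), P (xs[k + 1] - xs[k]) := by
  simp only [dList, List.forall_mem_map, List.mem_range]
  constructor
  · intro h k hk
    have h2 := h k (by omega)
    rwa [List.getD_eq_getElem xs 0 (by omega), List.getD_eq_getElem xs 0 (by omega)] at h2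
  · intro h k hk
    have h2 := h k (by omega)
    rwa [List.getD_eq_getElem xs 0 (by omega), List.getD_eq_getElem xs 0 (by omega)]

theorem dList_ne_nil (xs : List Int) (h : 2 ≤ xs.length) : dList xs ≠ [] := by
  simp only [dList, ne_eq, List.map_eq_nil_iff, List.range_eq_nil]
  omega

-- A's absDiff list is the elementwise absolute value of dList
theorem absDiff_eq (xs : List Int) :
    (PySem.List.pyRange 1 (xs.length : Int) 1).map
      (fun i => |PySem.List.pyGetD xs i 0 - PySem.List.pyGetD xs (i - 1) 0|) =
    (dList xs).map (fun z => |z|) := by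
  rw [PySem.List.pyRange_one]
  simp only [dList, List.map_map]
  have hlen : ((xs.length : Int) - 1).toNat = xs.length - 1 := by omega
  rw [hlen]
  apply List.map_congr_left
  intro k _
  simp only [Function.comp]
  rw [show (1 : Int) + (k : Int) - 1 = ((k : Nat) : Int) by omega,
    show (1 : Int) + (k : Int) = ((k + 1 : Nat) : Int) by omega,
    PySem.List.pyGetD_natCast, PySem.List.pyGetD_natCast]

-- B's diffs list is dList
theorem diffsB_eq (xs : List Int) :
    (PySem.List.pyRange 0 ((xs.length : Int) - 1) 1).map
      (fun k => PySem.List.pyGetD xs (k + 1) 0 - PySem.List.pyGetD xs k 0) =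
    dList xs := by
  rw [PySem.List.pyRange_one]
  simp only [dList, List.map_map]
  have hlen : ((xs.length : Int) - 1 - 0).toNat = xs.length - 1 := by omega
  rw [hlen]
  apply List.map_congr_left
  intro k _
  simp only [Function.comp]
  rw [show (0 : Int) + (k : Int) + 1 = ((k + 1 : Nat) : Int) by omega,
    show (0 : Int) + (k : Int) = ((k : Nat) : Int) by omega,
    PySem.List.pyGetD_natCast, PySem.List.pyGetD_natCast]

theorem okB_iff (xs : List Int) :
    okB xs = true ↔
      (∀ z ∈ dList xs, 1 ≤ z ∧ z ≤ 3) ∨ (∀ z ∈ dList xs, -3 ≤ z ∧ z ≤ -1) := by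
  unfold okB
  rw [diffsB_eq]
  simp [List.all_eq_true]

-- no duplicates ↔ Nodup
theorem ofList_sublist (xs : List Int) : (PySem.Set.ofList xs).Sublist xs := by
  induction xs using List.reverseRecOn with
  | nil => simp [PySem.Set.ofList]
  | append_singleton ys y ih =>
    rw [PySem.Set.ofList_append_singleton]
    unfold PySem.Set.add
    split
    · exact ih.trans (List.sublist_append_left ys [y])
    · exact ih.append (List.Sublist.refl [y])

theorem nodup_iff (xs : List Int) : isDuplicatesExistA xs = false ↔ xs.Nodup := by
  unfold isDuplicatesExistA countDuplicatesA
  constructor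
  · intro h
    have hlen : (PySem.Set.ofList xs).length = xs.length := by
      have := PySem.Set.length_ofList_le xs
      simp only [bne_eq_false_iff_eq] at h
      omega
    have := (ofList_sublist xs).eq_of_length hlen
    rw [← this]
    exact PySem.Set.nodup_ofList xs
  · intro h
    rw [PySem.Set.ofList_eq_self_of_nodup xs h]
    simp

-- the min/max tail of oldVerifyLineA, characterised on a nonempty list
theorem minmax_iff (l : List Int) (hne : l ≠ []) :
    (match PySem.List.min? l (fun x => x), PySem.List.max? l (fun x => x) with
     | some mn, some mx => decide (1 ≤ mn) && decide (mx < 4)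
     | _, _ => false) = true ↔ ∀ y ∈ l, 1 ≤ y ∧ y < 4 := by
  cases hm : PySem.List.min? l (fun x => x) with
  | none => exact absurd ((PySem.List.min?_eq_none_iff l _).mp hm) hne
  | some mn =>
    cases hM : PySem.List.max? l (fun x => x) with
    | none => exact absurd ((PySem.List.max?_eq_none_iff l _).mp hM) hne
    | some mx =>
      simp only [Bool.and_eq_true, decide_eq_true_eq]
      constructor
      · rintro ⟨h1, h4⟩ y hy
        exact ⟨le_trans h1 (PySem.List.min?_isMin hm y hy),
               lt_of_le_of_lt (PySem.List.max?_isMax hM y hy) h4⟩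
      · intro h
        exact ⟨(h mn (PySem.List.min?_mem hm)).1, (h mx (PySem.List.max?_mem hM)).2⟩

-- characterisation of A's per-line verifier
theorem oldVerify_iff (xs : List Int) (h2 : 2 ≤ xs.length) :
    oldVerifyLineA xs = true ↔
      xs.Nodup ∧
      (xs = PySem.List.sorted xs (fun x => x) ∨
       xs = (PySem.List.sorted xs (fun x => x)).reverse) ∧
      (∀ z ∈ dList xs, 1 ≤ |z| ∧ |z| < 4) := by
  unfold oldVerifyLineA
  split
  · rename_i hdup
    simp only [Bool.false_eq_true, false_iff]
    intro ⟨hnd, _, _⟩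
    rw [← nodup_iff] at hnd
    simp [hnd] at hdup
  · rename_i hdup
    have hnd : xs.Nodup := (nodup_iff xs).mp (by revert hdup; cases isDuplicatesExistA xs <;> simp)
    split
    · rename_i hs
      simp only [Bool.false_eq_true, false_iff]
      intro ⟨_, hsort, _⟩
      rcases hsort with h | h
      · exact hs.1 h
      · exact hs.2 h
    · rename_i hs
      rw [not_and_or, not_not, not_not] at hs
      rw [absDiff_eq, minmax_iff _ (by simp [dList_ne_nil xs h2])]
      simp only [List.forall_mem_map]
      exact ⟨fun h => ⟨hnd, hs, h⟩, fun ⟨_, _, h⟩ => h⟩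

-- Pairwise consequences of the two monotone-run conditions
theorem up_char (xs : List Int) (h : ∀ z ∈ dList xs, 1 ≤ z ∧ z ≤ 3) :
    List.Pairwise (· < ·) xs := by
  rw [← List.isChain_iff_pairwise, List.isChain_iff_getElem]
  intro k hk
  have := (forall_dList xs _).mp h k hk
  omega

theorem down_char (xs : List Int) (h : ∀ z ∈ dList xs, -3 ≤ z ∧ z ≤ -1) :
    List.Pairwise (fun a b => b < a) xs := by
  rw [← List.isChain_iff_pairwise, List.isChain_iff_getElem]
  intro k hk
  have := (forall_dList xs _).mp h k hk
  omega

theorem pairwise_adjacent {R : Int → Int → Prop} {xs : List Int} (h : List.Pairwise R xs)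
    (k : Nat) (hk : k + 1 < xs.length) : R xs[k] xs[k + 1] :=
  List.pairwise_iff_getElem.mp h k (k + 1) (by omega) hk (by omega)

-- the central equivalence: A's verifier equals B's linear scan on lists of length ≥ 2
theorem main_lemma (xs : List Int) (h : 2 ≤ xs.length) : oldVerifyLineA xs = okB xs := by
  rw [Bool.eq_iff_iff, oldVerify_iff xs h, okB_iff]
  constructor
  · rintro ⟨hnd, hsort, habs⟩
    rcases hsort with hs | hs
    · left
      have hp : List.Pairwise (· ≤ ·) xs := by
        have := PySem.List.sorted_pairwise xs (fun x => x); rw [← hs] at this; exact this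
      have hlt : List.Pairwise (· < ·) xs :=
        (hp.and hnd).imp (fun hab => lt_of_le_of_ne hab.1 hab.2)
      rw [forall_dList] at habs ⊢
      intro k hk
      have h1 := habs k hk
      have h2 := pairwise_adjacent hlt k hk
      rw [abs_of_pos (by omega)] at h1
      omega
    · right
      have hp : List.Pairwise (fun a b => b ≤ a) xs := by
        have := PySem.List.sorted_pairwise xs (fun x => x)
        have := List.pairwise_reverse.mpr this
        rw [← hs] at this
        exact this
      have hlt : List.Pairwise (fun a b => b < a) xs :=
        (hp.and hnd).imp (fun hab => lt_of_le_of_ne hab.1 (Ne.symm hab.2))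
      rw [forall_dList] at habs ⊢
      intro k hk
      have h1 := habs k hk
      have h2 := pairwise_adjacent hlt k hk
      rw [abs_of_neg (by omega)] at h1
      omega
  · intro hB
    rcases hB with hup | hdown
    · have hlt := up_char xs hup
      have hnd : xs.Nodup := hlt.imp ne_of_lt
      refine ⟨hnd, Or.inl ?_, ?_⟩
      · exact (PySem.List.sorted_eq_self_of_pairwise xs _ (hlt.imp le_of_lt)).symm
      · rw [forall_dList] at hup ⊢
        intro k hk
        have := hup k hk
        rw [abs_of_pos (by omega)]
        omega
    · have hlt := down_char xs hdown
      have hnd : xs.Nodup := hlt.imp (fun hba => (ne_of_lt hba).symm)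
      refine ⟨hnd, Or.inr ?_, ?_⟩
      · have hrev : List.Pairwise (· < ·) xs.reverse := List.pairwise_reverse.mpr hlt
        have := PySem.List.sorted_eq_of_perm_of_pairwise_lt xs xs.reverse (fun x => x)
          (xs.reverse_perm) hrev
        rw [this, List.reverse_reverse]
      · rw [forall_dList] at hdown ⊢
        intro k hk
        have := hdown k hk
        rw [abs_of_neg (by omega)]
        omega

theorem any_congr_mem (l : List Int) (f g : Int → Bool) (h : ∀ i ∈ l, f i = g i) :
    l.any f = l.any g := by
  induction l with
  | nil => rfl
  | cons x t ih =>
    simp only [List.any_cons, h x (by simp)]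
    rw [ih (fun i hi => h i (by simp [hi]))]

-- removal by pop at a valid nonnegative index equals B's slice concatenation
theorem pop_snd (line : List Int) (i : Int) (h0 : 0 ≤ i) (hi : i < line.length) :
    (PySem.List.pop? line i).map Prod.snd =
      some (PySem.List.slice line none (some i) ++
        PySem.List.slice line (some (i + 1)) none) := by
  have hcast : i = ((i.toNat : Nat) : Int) := by omega
  have hp := PySem.List.pop?_natCast line i.toNat (by omega)
  rw [← hcast] at hp
  rw [hp, PySem.List.slice_to line (by omega), PySem.List.slice_from line (by omega)]
  have h1 : (i + 1).toNat = i.toNat + 1 := by omega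
  rw [h1, List.eraseIdx_eq_take_drop_succ]
  rfl

theorem tryWithSingleTurningPoint_eq (line : List Int) (h3 : 3 ≤ line.length) :
    tryWithSingleTurningPoint line = tryWithSingleTurningPoint_alt line := by
  unfold tryWithSingleTurningPoint tryWithSingleTurningPoint_alt
  simp only []
  -- rewrite A's fold as an any over the same index list
  have hfold : ∀ (l : List Int) (b : Bool),
      l.foldl (fun status index =>
        match PySem.List.pop? line index with
        | some (_, newLine) => status || oldVerifyLineA newLine
        | none => status) b
      = (b || l.any (fun index =>
          match PySem.List.pop? line index with
          | some (_, newLine) => oldVerifyLineA newLine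
          | none => false)) := by
    intro l
    induction l with
    | nil => simp
    | cons x t ih =>
      intro b
      simp only [List.foldl_cons, List.any_cons, ih]
      cases hp : PySem.List.pop? line x with
      | none => simp
      | some r => simp [Bool.or_assoc]
  rw [hfold, Bool.false_or]
  -- the candidate index lists agree except for the final -1 vs n-1
  set g : Int → Bool := fun index =>
    match PySem.List.pop? line index with
    | some (_, newLine) => oldVerifyLineA newLine
    | none => false with hg
  set gB : Int → Bool := fun i =>
    okB (PySem.List.slice line none (some i) ++ PySem.List.slice line (some (i + 1)) none) with hgB
  set flt := (PySem.List.pyRange 2 ((line.length : Int) - 1) 1).filter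
    (fun i =>
      (PySem.List.pyGetD line (i - 1) 0 < PySem.List.pyGetD line i 0 &&
       PySem.List.pyGetD line (i + 1) 0 < PySem.List.pyGetD line i 0) ||
      (PySem.List.pyGetD line (i - 1) 0 > PySem.List.pyGetD line i 0 &&
       PySem.List.pyGetD line (i + 1) 0 > PySem.List.pyGetD line i 0)) with hflt
  have hg_gB : ∀ i : Int, 0 ≤ i → i < line.length → g i = gB i := by
    intro i h0 hi
    rw [hg, hgB]
    beta_reduce
    have hlen : (PySem.List.slice line none (some i) ++
        PySem.List.slice line (some (i + 1)) none).length = line.length - 1 := by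
      rw [PySem.List.slice_to line (by omega), PySem.List.slice_from line (by omega),
        List.length_append, List.length_take, List.length_drop]
      omega
    have hs := pop_snd line i h0 hi
    cases hp : PySem.List.pop? line i with
    | none => rw [hp] at hs; simp at hs
    | some r =>
      obtain ⟨v, nl⟩ := r
      rw [hp] at hs
      simp only [Option.map_some, Option.some.injEq] at hs
      simp only [hs]
      exact main_lemma _ (by omega)
  have hflt_mem : ∀ i ∈ flt, 0 ≤ i ∧ i < line.length := by
    intro i hi
    rw [hflt] at hi
    have := (List.mem_filter.mp hi).1
    rw [PySem.List.mem_pyRange_one] at this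
    omega
  -- last candidate: A pops -1, B slices at n-1; both give dropLast
  have hlast : g (-1) = gB ((line.length : Int) - 1) := by
    rw [hg, hgB]
    beta_reduce
    obtain ⟨ys, y, hys⟩ : ∃ ys y, line = ys ++ [y] := by
      rcases List.eq_nil_or_concat line with h | ⟨ys, y, h⟩
      · rw [h] at h3; simp at h3
      · exact ⟨ys, y, by simpa [List.concat_eq_append] using h⟩
    have hpop : PySem.List.pop? line (-1) = some (y, ys) := by
      rw [hys]; exact PySem.List.pop?_last ys y
    have h1 : PySem.List.slice line none (some ((line.length : Int) - 1)) = line.dropLast := by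
      rw [PySem.List.slice_to line (by omega)]
      have h' : ((line.length : Int) - 1).toNat = line.length - 1 := by omega
      rw [h', ← List.dropLast_eq_take]
    have h2 : PySem.List.slice line (some ((line.length : Int) - 1 + 1)) none = [] := by
      rw [PySem.List.slice_from line (by omega)]
      simp
    rw [hpop, h1, h2, List.append_nil]
    have hdl : line.dropLast = ys := by rw [hys]; simp
    rw [hdl]
    have hyslen : ys.length = line.length - 1 := by rw [hys]; simp
    exact main_lemma _ (by omega)
  have hflta : flt.any g = flt.any gB :=
    any_congr_mem flt g gB (fun i hi => hg_gB i (hflt_mem i hi).1 (hflt_mem i hi).2)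
  have h0 : g 0 = gB 0 := hg_gB 0 (by omega) (by omega)
  simp only [List.any_append, List.any_cons, List.any_nil, hflta, h0, hlast]

-- ===== VERDICT (by name: the statement is the Claim_ definition above) =====
theorem tryWithSingleTurningPoint_spec : Claim_equal_tryWithSingleTurningPoint := by
  intro line _ hpre
  unfold Spec_tryWithSingleTurningPoint
  exact tryWithSingleTurningPoint_eq line hpre
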